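-- pv_equiv track=rewrite | github.com/vex9z7/script | photo_import/photo_sync.py | _rsync_filters
-- ===== SOURCE A (Python) =====
-- def _rsync_filters(patterns: list[tuple[str, bool]]) -> list[str]:
--     rules = []
--
--     for pattern, excluded in patterns:
--         if not excluded:
--             continue
--         rules.append(f"- {pattern}")
--         rules.append(f"- {pattern}/***")
--
--     rules.append("+ */")
--
--     for pattern, excluded in patterns:
--         if excluded:
--             continue
--         rules.append(f"+ {pattern}")
--
--     rules.append("- *")
--     return rules
-- ===== SOURCE B (Python) =====
-- def _rsync_filters(patterns: list[tuple[str, bool]]) -> list[str]: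
--     excludes, includes = [], []
--     for pattern, excluded in patterns:
--         if excluded:
--             excludes.append(f"- {pattern}")
--             excludes.append(f"- {pattern}/***")
--         else:
--             includes.append(f"+ {pattern}")
--     return excludes + ["+ */"] + includes + ["- *"]
-- ===== Notes on version B (the rewrite author's own statement) =====
-- stated objective: simpler
-- what changed: Replaces A's two full scans of patterns with one scan that partitions the lines into two accumulator lists (excludes/includes), assembled in a single final expression.
import Mathlib
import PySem

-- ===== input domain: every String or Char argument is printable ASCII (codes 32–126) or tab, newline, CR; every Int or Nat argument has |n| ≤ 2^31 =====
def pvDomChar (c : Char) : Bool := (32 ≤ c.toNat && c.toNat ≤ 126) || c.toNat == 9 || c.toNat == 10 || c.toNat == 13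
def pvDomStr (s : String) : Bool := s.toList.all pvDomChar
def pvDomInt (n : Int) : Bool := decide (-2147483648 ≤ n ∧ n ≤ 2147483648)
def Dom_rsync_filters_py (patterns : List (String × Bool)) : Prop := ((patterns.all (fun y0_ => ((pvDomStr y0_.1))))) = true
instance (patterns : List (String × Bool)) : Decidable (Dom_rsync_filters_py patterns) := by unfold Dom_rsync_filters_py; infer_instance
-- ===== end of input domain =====

-- B partitions the filter lines in one scan over patterns instead of A's two full scans; objective: simpler.


-- ===== PORT A =====
-- Port of A: builds `rules` by two full scans of `patterns` (excluded lines first,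
-- then "+ */", then the include lines, then "- *"); each scan is a foldl over the list.
def rsync_filters_py (patterns : List (String × Bool)) : List String :=
  let rules : List String := patterns.foldl (fun rules pe =>
    if !pe.2 then rules
    else rules ++ ["- " ++ pe.1, "- " ++ pe.1 ++ "/***"]) []
  let rules := rules ++ ["+ */"]
  let rules := patterns.foldl (fun rules pe =>
    if pe.2 then rules
    else rules ++ ["+ " ++ pe.1]) rules
  rules ++ ["- *"]

-- ===== PORT B =====
-- B: one scan that partitions each pattern's lines into two accumulators, then one assembly.
def rsync_filters_py_alt (patterns : List (String × Bool)) : List String :=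
  let p : List String × List String := patterns.foldl (fun acc pe =>
    if pe.2 then (acc.1 ++ ["- " ++ pe.1, "- " ++ pe.1 ++ "/***"], acc.2)
    else (acc.1, acc.2 ++ ["+ " ++ pe.1])) ([], [])
  p.1 ++ ["+ */"] ++ p.2 ++ ["- *"]

-- ===== PRECONDITION & SPEC =====
def Spec_rsync_filters_py (patterns : List (String × Bool)) (out : List String) : Prop := out = rsync_filters_py_alt patterns
instance (patterns : List (String × Bool)) (out : List String) : Decidable (Spec_rsync_filters_py patterns out) := by unfold Spec_rsync_filters_py; infer_instance

-- ===== CLAIM (what is proved, stated in full; the proofs are below) =====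
def Claim_equal_rsync_filters_py : Prop := ∀ (patterns : List (String × Bool)), Dom_rsync_filters_py patterns → Spec_rsync_filters_py patterns (rsync_filters_py patterns)

-- ===== LEMMAS AND PROOFS =====
theorem pv_pair_fold (ps : List (String × Bool)) : ∀ (e i : List String),
    ps.foldl (fun acc pe =>
      if pe.2 then (acc.1 ++ ["- " ++ pe.1, "- " ++ pe.1 ++ "/***"], acc.2)
      else (acc.1, acc.2 ++ ["+ " ++ pe.1])) (e, i)
    = (ps.foldl (fun rules pe =>
        if !pe.2 then rules else rules ++ ["- " ++ pe.1, "- " ++ pe.1 ++ "/***"]) e,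
       ps.foldl (fun rules pe =>
        if pe.2 then rules else rules ++ ["+ " ++ pe.1]) i) := by
  induction ps with
  | nil => intro e i; rfl
  | cons hd tl ih =>
    intro e i
    rcases hd with ⟨s, b⟩
    cases b <;> simp [List.foldl_cons, ih]

theorem pv_fold2_shift (ps : List (String × Bool)) : ∀ (s t : List String),
    ps.foldl (fun rules pe => if pe.2 then rules else rules ++ ["+ " ++ pe.1]) (s ++ t)
    = s ++ ps.foldl (fun rules pe => if pe.2 then rules else rules ++ ["+ " ++ pe.1]) t := by
  induction ps with
  | nil => intro s t; rfl
  | cons hd tl ih =>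
    intro s t
    rcases hd with ⟨str, b⟩
    cases b
    · simpa [List.foldl_cons, List.append_assoc] using ih s (t ++ ["+ " ++ str])
    · simpa [List.foldl_cons] using ih s t

-- ===== VERDICT (by name: the statement is the Claim_ definition above) =====
theorem rsync_filters_py_spec : Claim_equal_rsync_filters_py := by
  intro ps _
  show rsync_filters_py ps = rsync_filters_py_alt ps
  simp only [rsync_filters_py, rsync_filters_py_alt, pv_pair_fold]
  have h := pv_fold2_shift ps (List.foldl (fun rules pe => if (!pe.2) = true then rules else rules ++ ["- " ++ pe.1, "- " ++ pe.1 ++ "/***"]) [] ps ++ ["+ */"]) []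
  rw [List.append_nil] at h
  rw [h]
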